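-- pv_equiv track=rewrite | github.com/staehlmich/pcl2_ex4 | fun_with_strings.py | _calc_edit_distance_table
-- ===== SOURCE A (Python) =====
-- def _calc_edit_distance_table(source, target):
--     """
--     calculate the table for edit-distance
--     Params:
--         source: sequence
--         target: sequence
--     Return:
--         d: 2D list
--         m: int, source length
--         n: int, target lenth
--     """
--     m = len(source)
--     n = len(target)
--     d = [[0 for _ in range(n+1)] for _ in range(m+1)]
--     d[0][0] = 0
--     for i in range(1, m+1):
--         for j in range(1, n+1):
--             if source[i-1].lower() == target[j-1].lower():
--                 d[i][j] = 1
--                 if source[i-2].lower() == target[j-2].lower():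
--                     d[i][j] = d[i - 1][j - 1] + 1
--             else:
--                 d[i][j] = 0
--     return d, m, n
-- ===== SOURCE B (Python) =====
-- def _calc_edit_distance_table(source, target):
--     """Diagonal sweep: each diagonal of the table is one run-length chain, so walk
--     every diagonal from its border cell with a run accumulator instead of the
--     row-major double loop with table look-backs."""
--     m = len(source)
--     n = len(target)
--     d = [[0] * (n + 1) for _ in range(m + 1)]
--     starts = [(i, 1) for i in range(1, m + 1)] + [(1, j) for j in range(2, n + 1)]
--     for i, j in starts:
--         run = 0
--         while i <= m and j <= n:
--             if source[i - 1].lower() == target[j - 1].lower():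
--                 run += 1
--             else:
--                 run = 0
--             d[i][j] = run
--             i += 1
--             j += 1
--     return d, m, n
-- ===== Notes on version B (the rewrite author's own statement) =====
-- stated objective: alternative
-- what changed: B replaces A's row-major double loop with d[i-1][j-1]/[i-2]/[j-2] table look-backs by a diagonal sweep: every diagonal of the table is one matching-run chain, so B walks each diagonal from its first-row/first-column border cell carrying a run accumulator (run+1 on a case-insensitive match, reset to 0 otherwise) and never reads the table at all.
import Mathlib
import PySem

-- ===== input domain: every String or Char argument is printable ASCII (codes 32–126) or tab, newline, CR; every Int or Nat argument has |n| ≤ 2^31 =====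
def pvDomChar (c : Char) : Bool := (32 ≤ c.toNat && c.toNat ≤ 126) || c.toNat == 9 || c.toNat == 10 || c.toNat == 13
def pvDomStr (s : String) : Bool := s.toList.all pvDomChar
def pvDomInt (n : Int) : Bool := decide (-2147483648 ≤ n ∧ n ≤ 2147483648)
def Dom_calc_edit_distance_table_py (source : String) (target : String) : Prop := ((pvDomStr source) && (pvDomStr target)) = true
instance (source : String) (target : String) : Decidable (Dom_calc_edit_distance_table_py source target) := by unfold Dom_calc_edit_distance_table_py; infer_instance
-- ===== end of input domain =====

-- B replaces A's row-major double loop with table look-backs by a diagonal sweep: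
-- each diagonal is walked from its border cell with a run accumulator; objective: alternative.

-- ===== PORT A =====
-- d[i][j] = v  /  d[i][j] reads on a 2D list (in range wherever the Pythons perform them)
def pvSet2 (d : List (List Int)) (i j : Nat) (v : Int) : List (List Int) :=
  d.set i ((d.getD i []).set j v)

def pvGet2 (d : List (List Int)) (i j : Nat) : Int :=
  (d.getD i []).getD j 0

-- A's loops write into a mutable (m+1)x(n+1) zero table; 'x[k].lower()' on the 1-char
-- string is ported exactly as Chars.lowerChar of the code point.
def calc_edit_distance_table_py (source : String) (target : String) : List (List Int) × Int × Int :=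
  let m : Int := PySem.Str.len source
  let n : Int := PySem.Str.len target
  let d0 : List (List Int) :=
    (PySem.List.pyRange 0 (m+1) 1).map (fun _ => (PySem.List.pyRange 0 (n+1) 1).map (fun _ => (0:Int)))
  let d0 := pvSet2 d0 0 0 0
  let d := (PySem.List.pyRange 1 (m+1) 1).foldl (fun d i =>
    (PySem.List.pyRange 1 (n+1) 1).foldl (fun d j =>
      if (PySem.Str.pyGet? source (i-1)).map PySem.Chars.lowerChar
         == (PySem.Str.pyGet? target (j-1)).map PySem.Chars.lowerChar then
        let d1 := pvSet2 d i.toNat j.toNat 1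
        if (PySem.Str.pyGet? source (i-2)).map PySem.Chars.lowerChar
           == (PySem.Str.pyGet? target (j-2)).map PySem.Chars.lowerChar then
          pvSet2 d1 i.toNat j.toNat (pvGet2 d1 (i.toNat-1) (j.toNat-1) + 1)
        else d1
      else pvSet2 d i.toNat j.toNat 0) d) d0
  (d, m, n)

-- ===== PORT B =====
-- B's 'run = run + 1 if source[i-1].lower() == target[j-1].lower() else 0' line
def pvRunStep (source target : String) (i j run : Int) : Int :=
  if (PySem.Str.pyGet? source (i-1)).map PySem.Chars.lowerChar
     == (PySem.Str.pyGet? target (j-1)).map PySem.Chars.lowerChar then run + 1 else 0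

-- B's inner 'while i <= m and j <= n' loop: walk one diagonal with the run accumulator.
def pvDiagB (source target : String) (m n : Int) (i j run : Int) (d : List (List Int)) : List (List Int) :=
  if i ≤ m ∧ j ≤ n then
    pvDiagB source target m n (i+1) (j+1) (pvRunStep source target i j run)
      (pvSet2 d i.toNat j.toNat (pvRunStep source target i j run))
  else d
termination_by (m + 1 - i).toNat
decreasing_by omega

def calc_edit_distance_table_py_alt (source : String) (target : String) : List (List Int) × Int × Int :=
  let m : Int := PySem.Str.len source
  let n : Int := PySem.Str.len target
  let d0 : List (List Int) := (PySem.List.pyRange 0 (m+1) 1).map (fun _ => List.replicate (n+1).toNat (0:Int))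
  let starts : List (Int × Int) :=
    (PySem.List.pyRange 1 (m+1) 1).map (fun i => (i, (1:Int)))
    ++ (PySem.List.pyRange 2 (n+1) 1).map (fun j => ((1:Int), j))
  let d := starts.foldl (fun d ij => pvDiagB source target m n ij.1 ij.2 0 d) d0
  (d, m, n)

-- ===== PRECONDITION & SPEC =====
def Spec_calc_edit_distance_table_py (source : String) (target : String) (out : List (List Int) × Int × Int) : Prop := out = calc_edit_distance_table_py_alt source target
instance (source : String) (target : String) (out : List (List Int) × Int × Int) : Decidable (Spec_calc_edit_distance_table_py source target out) := by unfold Spec_calc_edit_distance_table_py; infer_instance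

-- ===== CLAIM (what is proved, stated in full; the proofs are below) =====
def Claim_equal_calc_edit_distance_table_py : Prop := ∀ (source : String) (target : String), Dom_calc_edit_distance_table_py source target → Spec_calc_edit_distance_table_py source target (calc_edit_distance_table_py source target)

-- ===== LEMMAS AND PROOFS =====
-- Both programs are proved equal to the same closed table pvTbl of matching-run lengths:
-- pvRun i j is the value A's cell (i,j) ends up holding and B's diagonal walk computes.

def pvCeq (a b : Char) : Bool := PySem.Chars.lowerChar a == PySem.Chars.lowerChar b

def pvRun (s t : List Char) : Nat → Nat → Int
  | 0, _ => 0
  | _+1, 0 => 0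
  | i+1, j+1 => if pvCeq (s.getD i ' ') (t.getD j ' ') then pvRun s t i j + 1 else 0

@[simp] lemma pvRun_zero_left (s t : List Char) (j : Nat) : pvRun s t 0 j = 0 := by cases j <;> rfl

@[simp] lemma pvRun_zero_right (s t : List Char) (i : Nat) : pvRun s t i 0 = 0 := by cases i <;> rfl

def pvRow (s t : List Char) (n i : Nat) : List Int := (List.range (n+1)).map (fun j => pvRun s t i j)

def pvTbl (s t : List Char) (m n : Nat) : List (List Int) := (List.range (m+1)).map (pvRow s t n)

lemma pv_set_map_range {α : Type} (f : Nat → α) (N i : Nat) (h : i < N) (v : α) :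
    ((List.range N).map f).set i v = (List.range N).map (fun x => if x = i then v else f x) := by
  apply List.ext_getElem
  · simp
  · intro k h1 h2
    simp at h1
    rcases eq_or_ne k i with rfl | hne
    · simp
    · simp [hne, Ne.symm hne]

lemma pv_getD_map_range {α : Type} (f : Nat → α) (N i : Nat) (h : i < N) (d : α) :
    ((List.range N).map f).getD i d = f i := by
  rw [List.getD_eq_getElem?_getD]
  simp [h]

def pvPartIn (s t : List Char) (m n k j0 : Nat) : List (List Int) :=
  (List.range (m+1)).map (fun i => (List.range (n+1)).map
    (fun j => if i ≤ k ∨ (i = k + 1 ∧ j ≤ j0) then pvRun s t i j else 0))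

-- the in-range write of the freshly computed cell advances the inner invariant
lemma pvSet2_pvPartIn (s t : List Char) (m n k j0 : Nat) (hk : k < m) (hj : j0 < n) :
    pvSet2 (pvPartIn s t m n k j0) (k+1) (j0+1) (pvRun s t (k+1) (j0+1))
      = pvPartIn s t m n k (j0+1) := by
  unfold pvSet2 pvPartIn
  rw [pv_getD_map_range _ _ _ (by omega), pv_set_map_range _ _ _ (by omega),
    pv_set_map_range _ _ _ (by omega)]
  apply List.map_congr_left
  intro i hi
  rcases eq_or_ne i (k+1) with rfl | hne
  · rw [if_pos rfl]
    apply List.map_congr_left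
    intro j hj'
    rcases eq_or_ne j (j0+1) with rfl | hne'
    · simp
    · rw [if_neg hne', if_congr (show (k+1 ≤ k ∨ (k+1 = k + 1 ∧ j ≤ j0)) ↔ (k+1 ≤ k ∨ (k+1 = k + 1 ∧ j ≤ j0+1)) by omega) rfl rfl]
  · rw [if_neg hne]
    apply List.map_congr_left
    intro j _
    rw [if_congr (show (i ≤ k ∨ (i = k + 1 ∧ j ≤ j0)) ↔ (i ≤ k ∨ (i = k + 1 ∧ j ≤ j0+1)) by omega) rfl rfl]

lemma pvSet2_twice (d : List (List Int)) (i j : Nat) (w v : Int) (h : i < d.length) :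
    pvSet2 (pvSet2 d i j w) i j v = pvSet2 d i j v := by
  unfold pvSet2
  simp only [List.getD_eq_getElem?_getD]
  rw [List.getElem?_set_self (by simpa using h)]
  simp [List.set_set]

def pvPartA (s t : List Char) (m n k : Nat) : List (List Int) :=
  (List.range (m+1)).map (fun i => (List.range (n+1)).map (fun j => if i ≤ k then pvRun s t i j else 0))

lemma pvPartIn_zero (s t : List Char) (m n k : Nat) :
    pvPartIn s t m n k 0 = pvPartA s t m n k := by
  unfold pvPartIn pvPartA
  apply List.map_congr_left
  intro i _
  apply List.map_congr_left
  intro j _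
  by_cases h1 : i ≤ k
  · rw [if_pos (Or.inl h1), if_pos h1]
  · by_cases h2 : i = k + 1 ∧ j ≤ 0
    · rw [if_pos (Or.inr h2), if_neg h1]
      have : j = 0 := by omega
      simp [this]
    · rw [if_neg (by tauto), if_neg h1]

lemma pvPartIn_last (s t : List Char) (m n k : Nat) :
    pvPartIn s t m n k n = pvPartA s t m n (k+1) := by
  unfold pvPartIn pvPartA
  apply List.map_congr_left
  intro i _
  apply List.map_congr_left
  intro j hj
  simp only [List.mem_range] at hj
  rw [if_congr (show (i ≤ k ∨ (i = k + 1 ∧ j ≤ n)) ↔ i ≤ k + 1 by omega) rfl rfl]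

lemma pvPartIn_length (s t : List Char) (m n k j0 : Nat) :
    (pvPartIn s t m n k j0).length = m + 1 := by simp [pvPartIn]

-- both Pythons read x.lower() of single characters; on the loops' index ranges these reads are total
lemma pv_str_get (source : String) (k : Nat) (hk : k < source.toList.length) :
    PySem.Str.pyGet? source ((k:Nat):Int) = some (source.toList.getD k ' ') := by
  rw [PySem.Str.pyGet?_eq]
  simp [PySem.Chars.pyGet?, PySem.List.pyGet?_natCast, List.getD_eq_getElem?_getD,
    List.getElem?_eq_getElem hk]

-- one execution of A's inner-loop body advances the inner invariant

lemma pvInnerStep (source target : String) (k j0 : Nat)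
    (hk : k < source.toList.length) (hj : j0 < target.toList.length) :
    (if (PySem.Str.pyGet? source (1+(k:Int)-1)).map PySem.Chars.lowerChar
        == (PySem.Str.pyGet? target (1+(j0:Int)-1)).map PySem.Chars.lowerChar then
       if (PySem.Str.pyGet? source (1+(k:Int)-2)).map PySem.Chars.lowerChar
          == (PySem.Str.pyGet? target (1+(j0:Int)-2)).map PySem.Chars.lowerChar then
         pvSet2 (pvSet2 (pvPartIn source.toList target.toList source.toList.length target.toList.length k j0)
             (1+(k:Int)).toNat (1+(j0:Int)).toNat 1) (1+(k:Int)).toNat (1+(j0:Int)).toNat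
           (pvGet2 (pvSet2 (pvPartIn source.toList target.toList source.toList.length target.toList.length k j0)
               (1+(k:Int)).toNat (1+(j0:Int)).toNat 1) ((1+(k:Int)).toNat-1) ((1+(j0:Int)).toNat-1) + 1)
       else pvSet2 (pvPartIn source.toList target.toList source.toList.length target.toList.length k j0)
              (1+(k:Int)).toNat (1+(j0:Int)).toNat 1
     else pvSet2 (pvPartIn source.toList target.toList source.toList.length target.toList.length k j0)
            (1+(k:Int)).toNat (1+(j0:Int)).toNat 0)
    = pvPartIn source.toList target.toList source.toList.length target.toList.length k (j0+1) := by
  have e1 : (1:Int)+(k:Int)-1 = ((k:Nat):Int) := by omega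
  have e2 : (1:Int)+(j0:Int)-1 = ((j0:Nat):Int) := by omega
  have htn1 : ((1:Int)+(k:Int)).toNat = k + 1 := by omega
  have htn2 : ((1:Int)+(j0:Int)).toNat = j0 + 1 := by omega
  rw [e1, e2, htn1, htn2, pv_str_get source k hk, pv_str_get target j0 hj]
  have hceq1 : ((some (source.toList.getD k ' ')).map PySem.Chars.lowerChar
      == (some (target.toList.getD j0 ' ')).map PySem.Chars.lowerChar)
      = pvCeq (source.toList.getD k ' ') (target.toList.getD j0 ' ') := by
    simp [pvCeq]
  rw [hceq1]
  have hrun_succ : pvRun source.toList target.toList (k+1) (j0+1)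
      = if pvCeq (source.toList.getD k ' ') (target.toList.getD j0 ' ')
        then pvRun source.toList target.toList k j0 + 1 else 0 := by
    simp only [pvRun]
  by_cases hc : pvCeq (source.toList.getD k ' ') (target.toList.getD j0 ' ') = true
  · rw [if_pos hc]
    have hget : pvGet2 (pvSet2 (pvPartIn source.toList target.toList source.toList.length target.toList.length k j0) (k+1) (j0+1) 1) (k+1-1) (j0+1-1)
        = pvRun source.toList target.toList k j0 := by
      unfold pvGet2 pvSet2
      simp only [Nat.add_sub_cancel, List.getD_eq_getElem?_getD]
      rw [List.getElem?_set_ne (by omega)]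
      unfold pvPartIn
      rw [List.getElem?_map, List.getElem?_range (by omega)]
      simp only [Option.map_some, Option.getD_some]
      rw [List.getElem?_map, List.getElem?_range (by omega)]
      simp only [Option.map_some, Option.getD_some]
      rw [if_pos (Or.inl (le_refl k))]
    have hr1 : pvRun source.toList target.toList (k+1) (j0+1)
        = pvRun source.toList target.toList k j0 + 1 := by rw [hrun_succ, if_pos hc]
    by_cases hc2 : ((PySem.Str.pyGet? source (1+(k:Int)-2)).map PySem.Chars.lowerChar
        == (PySem.Str.pyGet? target (1+(j0:Int)-2)).map PySem.Chars.lowerChar) = true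
    · rw [if_pos hc2, hget,
        pvSet2_twice _ _ _ _ _ (by rw [pvPartIn_length]; omega), ← hr1,
        pvSet2_pvPartIn _ _ _ _ _ _ hk hj]
    · rw [if_neg hc2]
      -- the overwrite is skipped, but the cell already holds 1 = the run value
      have hrz : pvRun source.toList target.toList k j0 = 0 := by
        match k, j0 with
        | 0, _ => simp
        | _+1, 0 => simp
        | k'+1, j'+1 =>
          have ek : (1:Int)+((k'+1:Nat):Int)-2 = ((k':Nat):Int) := by push_cast; omega
          have ej : (1:Int)+((j'+1:Nat):Int)-2 = ((j':Nat):Int) := by push_cast; omega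
          rw [ek, ej, pv_str_get source k' (by omega), pv_str_get target j' (by omega)] at hc2
          simp only [Option.map_some, beq_iff_eq, Option.some.injEq] at hc2
          have hcf : pvCeq (source.toList.getD k' ' ') (target.toList.getD j' ' ') = false := by
            simp only [pvCeq, beq_eq_false_iff_ne, ne_eq]
            exact hc2
          simp only [pvRun]
          rw [hcf]
          simp
      have h1 : (1:Int) = pvRun source.toList target.toList (k+1) (j0+1) := by
        rw [hr1, hrz]; norm_num
      rw [h1, pvSet2_pvPartIn _ _ _ _ _ _ hk hj]
  · rw [if_neg hc]
    have h0 : (0:Int) = pvRun source.toList target.toList (k+1) (j0+1) := by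
      rw [hrun_succ, if_neg hc]
    rw [h0, pvSet2_pvPartIn _ _ _ _ _ _ hk hj]

lemma pvRowFoldA (source target : String) (k : Nat) (hk : k < source.toList.length)
    (J : Nat) (hJ : J ≤ target.toList.length) :
    (List.range J).foldl (fun (d : List (List Int)) (j0 : Nat) =>
      if (PySem.Str.pyGet? source (1+(k:Int)-1)).map PySem.Chars.lowerChar
         == (PySem.Str.pyGet? target (1+(j0:Int)-1)).map PySem.Chars.lowerChar then
        if (PySem.Str.pyGet? source (1+(k:Int)-2)).map PySem.Chars.lowerChar
           == (PySem.Str.pyGet? target (1+(j0:Int)-2)).map PySem.Chars.lowerChar then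
          pvSet2 (pvSet2 d (1+(k:Int)).toNat (1+(j0:Int)).toNat 1) (1+(k:Int)).toNat (1+(j0:Int)).toNat
            (pvGet2 (pvSet2 d (1+(k:Int)).toNat (1+(j0:Int)).toNat 1) ((1+(k:Int)).toNat-1) ((1+(j0:Int)).toNat-1) + 1)
        else pvSet2 d (1+(k:Int)).toNat (1+(j0:Int)).toNat 1
      else pvSet2 d (1+(k:Int)).toNat (1+(j0:Int)).toNat 0)
      (pvPartIn source.toList target.toList source.toList.length target.toList.length k 0)
    = pvPartIn source.toList target.toList source.toList.length target.toList.length k J := by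
  induction J with
  | zero => simp
  | succ J ih =>
    rw [List.range_succ, List.foldl_append, ih (by omega)]
    simp only [List.foldl_cons, List.foldl_nil]
    exact pvInnerStep source target k J hk (by omega)

lemma pvInnerRange (target : String) :
    PySem.List.pyRange 1 ((target.toList.length:Int)+1) 1
      = (List.range target.toList.length).map (fun (j0 : Nat) => 1+(j0:Int)) := by
  have h : ((target.toList.length:Int)+1-1).toNat = target.toList.length := by omega
  rw [PySem.List.pyRange_one, h]

lemma pvFoldA (source target : String) (K : Nat) (hK : K ≤ source.toList.length) :
    (List.range K).foldl (fun (d : List (List Int)) (k : Nat) =>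
      (PySem.List.pyRange 1 ((target.toList.length:Int)+1) 1).foldl (fun d j =>
        if (PySem.Str.pyGet? source (1+(k:Int)-1)).map PySem.Chars.lowerChar
           == (PySem.Str.pyGet? target (j-1)).map PySem.Chars.lowerChar then
          let d1 := pvSet2 d (1+(k:Int)).toNat j.toNat 1
          if (PySem.Str.pyGet? source (1+(k:Int)-2)).map PySem.Chars.lowerChar
             == (PySem.Str.pyGet? target (j-2)).map PySem.Chars.lowerChar then
            pvSet2 d1 (1+(k:Int)).toNat j.toNat (pvGet2 d1 ((1+(k:Int)).toNat-1) (j.toNat-1) + 1)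
          else d1
        else pvSet2 d (1+(k:Int)).toNat j.toNat 0) d)
      (pvPartA source.toList target.toList source.toList.length target.toList.length 0)
    = pvPartA source.toList target.toList source.toList.length target.toList.length K := by
  induction K with
  | zero => simp
  | succ K ih =>
    rw [List.range_succ, List.foldl_append, ih (by omega)]
    simp only [List.foldl_cons, List.foldl_nil]
    rw [pvInnerRange, List.foldl_map, ← pvPartIn_zero,
      pvRowFoldA source target K (by omega) target.toList.length (le_refl _),
      pvPartIn_last]

lemma pvPartA_full (s t : List Char) (n : Nat) :
    pvPartA s t s.length n s.length = pvTbl s t s.length n := by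
  unfold pvPartA pvTbl pvRow
  apply List.map_congr_left
  intro i hi
  simp only [List.mem_range] at hi
  apply List.map_congr_left
  intro j _
  rw [if_pos (by omega)]

lemma pvD0 (source target : String) :
    pvSet2 ((PySem.List.pyRange 0 ((source.toList.length:Int)+1) 1).map
        (fun _ => (PySem.List.pyRange 0 ((target.toList.length:Int)+1) 1).map (fun _ => (0:Int)))) 0 0 0
      = pvPartA source.toList target.toList source.toList.length target.toList.length 0 := by
  have e1 : ((source.toList.length:Int)+1) = ((source.toList.length+1 : Nat):Int) := by push_cast; ring
  have e2 : ((target.toList.length:Int)+1) = ((target.toList.length+1 : Nat):Int) := by push_cast; ring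
  rw [e1, e2, PySem.List.pyRange_zero_nat, PySem.List.pyRange_zero_nat, List.map_map, List.map_map]
  simp only [Function.comp_def]
  unfold pvSet2 pvPartA
  rw [pv_getD_map_range _ _ _ (by omega), pv_set_map_range _ _ _ (by omega),
    pv_set_map_range _ _ _ (by omega)]
  apply List.map_congr_left
  intro i _
  by_cases hi : i = 0
  · subst hi
    rw [if_pos rfl]
    apply List.map_congr_left
    intro j _
    split_ifs <;> simp
  · rw [if_neg hi]
    apply List.map_congr_left
    intro j _
    rw [if_neg (by omega)]

lemma pvA_eq (source target : String) :
    calc_edit_distance_table_py source target =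
      (pvTbl source.toList target.toList source.toList.length target.toList.length,
       (source.toList.length : Int), (target.toList.length : Int)) := by
  unfold calc_edit_distance_table_py
  simp only [PySem.Str.len_eq]
  rw [pvD0]
  have hr : PySem.List.pyRange 1 ((source.toList.length:Int)+1) 1
      = (List.range source.toList.length).map (fun (k : Nat) => 1+(k:Int)) := by
    have h : ((source.toList.length:Int)+1-1).toNat = source.toList.length := by omega
    rw [PySem.List.pyRange_one, h]
  rw [hr, List.foldl_map, pvFoldA source target source.toList.length (le_refl _),
    pvPartA_full]

-- ===== B-side proof: the diagonal sweep fills the same table =====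
-- pvTblK: table whose cells on the already-swept diagonals (keys K, key = i - j) hold pvRun,
-- the rest 0; pvTblKD: additionally the current diagonal k is filled up to row icur (exclusive).

def pvTblK (s t : List Char) (m n : Nat) (K : List Int) : List (List Int) :=
  (List.range (m+1)).map (fun (i : Nat) => (List.range (n+1)).map (fun (j : Nat) =>
    if 1 ≤ i ∧ 1 ≤ j ∧ ((i:Int)-(j:Int)) ∈ K then pvRun s t i j else 0))

def pvTblKD (s t : List Char) (m n : Nat) (K : List Int) (k : Int) (icur : Nat) : List (List Int) :=
  (List.range (m+1)).map (fun (i : Nat) => (List.range (n+1)).map (fun (j : Nat) =>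
    if 1 ≤ i ∧ 1 ≤ j ∧ (((i:Int)-(j:Int)) ∈ K ∨ ((i:Int)-(j:Int) = k ∧ i < icur)) then pvRun s t i j else 0))

lemma pvSet2_tblKD (s t : List Char) (m n : Nat) (K : List Int) (k : Int) (i j : Nat)
    (hi : 1 ≤ i) (hj : 1 ≤ j) (him : i ≤ m) (hjn : j ≤ n) (hd : (i:Int)-(j:Int) = k) :
    pvSet2 (pvTblKD s t m n K k i) i j (pvRun s t i j) = pvTblKD s t m n K k (i+1) := by
  unfold pvSet2 pvTblKD
  rw [pv_getD_map_range _ _ _ (by omega), pv_set_map_range _ _ _ (by omega),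
    pv_set_map_range _ _ _ (by omega)]
  apply List.map_congr_left
  intro i' _
  rcases eq_or_ne i' i with rfl | hne
  · rw [if_pos rfl]
    apply List.map_congr_left
    intro j' hj'
    simp only [List.mem_range] at hj'
    rcases eq_or_ne j' j with rfl | hne'
    · have hc : (1 ≤ i' ∧ 1 ≤ j' ∧ (((i':Int)-(j':Int)) ∈ K ∨ ((i':Int)-(j':Int) = k ∧ i' < i'+1))) :=
        ⟨hi, hj, Or.inr ⟨hd, by omega⟩⟩
      rw [if_pos rfl, if_pos hc]
    · rw [if_neg hne']
      have hiff : (1 ≤ i' ∧ 1 ≤ j' ∧ (((i':Int)-(j':Int)) ∈ K ∨ ((i':Int)-(j':Int) = k ∧ i' < i')))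
          ↔ (1 ≤ i' ∧ 1 ≤ j' ∧ (((i':Int)-(j':Int)) ∈ K ∨ ((i':Int)-(j':Int) = k ∧ i' < i'+1))) := by
        constructor
        · rintro ⟨a, b, c | ⟨c1, c2⟩⟩
          · exact ⟨a, b, Or.inl c⟩
          · omega
        · rintro ⟨a, b, c | ⟨c1, c2⟩⟩
          · exact ⟨a, b, Or.inl c⟩
          · -- j' on the same diagonal through row i' would be j, excluded
            exfalso
            have : (j':Int) = (j:Int) := by omega
            have : j' = j := by exact_mod_cast this
            exact hne' this
      rw [if_congr hiff rfl rfl]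
  · rw [if_neg hne]
    apply List.map_congr_left
    intro j' _
    have hiff : (1 ≤ i' ∧ 1 ≤ j' ∧ (((i':Int)-(j':Int)) ∈ K ∨ ((i':Int)-(j':Int) = k ∧ i' < i)))
        ↔ (1 ≤ i' ∧ 1 ≤ j' ∧ (((i':Int)-(j':Int)) ∈ K ∨ ((i':Int)-(j':Int) = k ∧ i' < i+1))) := by
      constructor
      · rintro ⟨a, b, c | ⟨c1, c2⟩⟩
        · exact ⟨a, b, Or.inl c⟩
        · exact ⟨a, b, Or.inr ⟨c1, by omega⟩⟩
      · rintro ⟨a, b, c | ⟨c1, c2⟩⟩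
        · exact ⟨a, b, Or.inl c⟩
        · have h' : i' < i := by omega
          exact ⟨a, b, Or.inr ⟨c1, h'⟩⟩
    rw [if_congr hiff rfl rfl]

-- when the walk has gone past the table, the current diagonal is complete
lemma pvTblKD_done (s t : List Char) (m n : Nat) (K : List Int) (k : Int) (i j : Nat)
    (hd : (i:Int)-(j:Int) = k) (hstop : m < i ∨ n < j) :
    pvTblKD s t m n K k i = pvTblK s t m n (K ++ [k]) := by
  unfold pvTblKD pvTblK
  apply List.map_congr_left
  intro i' hi'
  simp only [List.mem_range] at hi'
  apply List.map_congr_left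
  intro j' hj'
  simp only [List.mem_range] at hj'
  have hiff : (1 ≤ i' ∧ 1 ≤ j' ∧ (((i':Int)-(j':Int)) ∈ K ∨ ((i':Int)-(j':Int) = k ∧ i' < i)))
      ↔ (1 ≤ i' ∧ 1 ≤ j' ∧ ((i':Int)-(j':Int)) ∈ K ++ [k]) := by
    simp only [List.mem_append, List.mem_singleton]
    constructor
    · rintro ⟨a, b, c | ⟨c1, _⟩⟩
      · exact ⟨a, b, Or.inl c⟩
      · exact ⟨a, b, Or.inr c1⟩
    · rintro ⟨a, b, c | c⟩
      · exact ⟨a, b, Or.inl c⟩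
      · refine ⟨a, b, Or.inr ⟨c, ?_⟩⟩
        omega
  rw [if_congr hiff rfl rfl]

-- a fresh diagonal starting at a border cell: nothing of it is filled yet
lemma pvTblKD_start (s t : List Char) (m n : Nat) (K : List Int) (k : Int) (i0 : Nat)
    (hstart : ∀ i' j' : Nat, 1 ≤ i' → 1 ≤ j' → (i':Int)-(j':Int) = k → i0 ≤ i') :
    pvTblKD s t m n K k i0 = pvTblK s t m n K := by
  unfold pvTblKD pvTblK
  apply List.map_congr_left
  intro i' _
  apply List.map_congr_left
  intro j' _
  have hiff : (1 ≤ i' ∧ 1 ≤ j' ∧ (((i':Int)-(j':Int)) ∈ K ∨ ((i':Int)-(j':Int) = k ∧ i' < i0)))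
      ↔ (1 ≤ i' ∧ 1 ≤ j' ∧ ((i':Int)-(j':Int)) ∈ K) := by
    constructor
    · rintro ⟨a, b, c | ⟨c1, c2⟩⟩
      · exact ⟨a, b, c⟩
      · exact absurd (hstart i' j' a b c1) (by omega)
    · rintro ⟨a, b, c⟩
      exact ⟨a, b, Or.inl c⟩
  rw [if_congr hiff rfl rfl]

-- one full diagonal walk turns K into K ++ [k]
lemma pvDiagB_walk (source target : String) (K : List Int) (k : Int) :
    ∀ (N : Nat) (i j : Nat), source.toList.length + 1 - i ≤ N → 1 ≤ i → 1 ≤ j →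
      (i:Int)-(j:Int) = k →
    pvDiagB source target (source.toList.length:Int) (target.toList.length:Int)
        (i:Int) (j:Int) (pvRun source.toList target.toList (i-1) (j-1))
        (pvTblKD source.toList target.toList source.toList.length target.toList.length K k i)
      = pvTblK source.toList target.toList source.toList.length target.toList.length (K ++ [k]) := by
  intro N
  induction N with
  | zero =>
    intro i j hN hi hj hd
    have him : source.toList.length < i := by omega
    rw [pvDiagB]
    rw [if_neg (by omega)]
    exact pvTblKD_done _ _ _ _ _ _ i j hd (Or.inl him)
  | succ N ih =>
    intro i j hN hi hj hd
    by_cases hin : i ≤ source.toList.length ∧ j ≤ target.toList.length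
    · rw [pvDiagB]
      rw [if_pos (by constructor <;> [exact_mod_cast hin.1; exact_mod_cast hin.2])]
      have hrun : pvRunStep source target (i:Int) (j:Int)
            (pvRun source.toList target.toList (i-1) (j-1))
          = pvRun source.toList target.toList i j := by
        unfold pvRunStep
        have e1 : (i:Int)-1 = ((i-1:Nat):Int) := by omega
        have e2 : (j:Int)-1 = ((j-1:Nat):Int) := by omega
        rw [e1, e2, pv_str_get source (i-1) (by omega), pv_str_get target (j-1) (by omega)]
        have hceq : ((some (source.toList.getD (i-1) ' ')).map PySem.Chars.lowerChar
            == (some (target.toList.getD (j-1) ' ')).map PySem.Chars.lowerChar)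
            = pvCeq (source.toList.getD (i-1) ' ') (target.toList.getD (j-1) ' ') := by
          simp [pvCeq]
        rw [hceq]
        have hi' : i = (i-1) + 1 := by omega
        have hj' : j = (j-1) + 1 := by omega
        conv_rhs => rw [hi', hj']
        simp only [pvRun]
      rw [hrun]
      have htn1 : ((i:Nat):Int).toNat = i := by omega
      have htn2 : ((j:Nat):Int).toNat = j := by omega
      rw [htn1, htn2,
        pvSet2_tblKD _ _ _ _ _ _ i j hi hj hin.1 hin.2 hd]
      have e3 : ((i:Int)+1) = (((i+1:Nat)):Int) := by push_cast; ring
      have e4 : ((j:Int)+1) = (((j+1:Nat)):Int) := by push_cast; ring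
      have e5 : pvRun source.toList target.toList i j
          = pvRun source.toList target.toList ((i+1)-1) ((j+1)-1) := by
        simp
      rw [e3, e4, e5]
      exact ih (i+1) (j+1) (by omega) (by omega) (by omega) (by push_cast; omega)
    · rw [pvDiagB]
      rw [if_neg (by omega)]
      exact pvTblKD_done _ _ _ _ _ _ i j hd (by omega)

-- the empty-K table is the zero table B starts from
lemma pvB_init (source target : String) :
    (PySem.List.pyRange 0 ((source.toList.length:Int)+1) 1).map
        (fun _ => List.replicate (((target.toList.length:Int))+1).toNat (0:Int))
      = pvTblK source.toList target.toList source.toList.length target.toList.length [] := by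
  have e1 : ((source.toList.length:Int)+1) = ((source.toList.length+1 : Nat):Int) := by push_cast; ring
  rw [e1, PySem.List.pyRange_zero_nat, List.map_map]
  simp only [Function.comp_def]
  unfold pvTblK
  apply List.map_congr_left
  intro i _
  have e2 : (((target.toList.length:Int))+1).toNat = target.toList.length + 1 := by omega
  rw [e2]
  apply List.ext_getElem
  · simp
  · intro j h1 h2
    simp

def pvKA (M : Nat) : List Int := (List.range M).map (fun (a : Nat) => (a:Int))

lemma pvFoldB1 (source target : String) (M : Nat) (hM : M ≤ source.toList.length) :
    (List.range M).foldl (fun d (a : Nat) =>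
        pvDiagB source target (source.toList.length:Int) (target.toList.length:Int)
          (1+(a:Int)) 1 0 d)
      (pvTblK source.toList target.toList source.toList.length target.toList.length [])
    = pvTblK source.toList target.toList source.toList.length target.toList.length (pvKA M) := by
  induction M with
  | zero => simp [pvKA]
  | succ M ih =>
    rw [List.range_succ, List.foldl_append, ih (by omega)]
    simp only [List.foldl_cons, List.foldl_nil]
    have e1 : (1:Int)+(M:Int) = (((M+1:Nat)):Int) := by push_cast; ring
    have e2 : (1:Int) = (((1:Nat)):Int) := by norm_num
    have e3 : (0:Int) = pvRun source.toList target.toList ((M+1)-1) (1-1) := by simp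
    have hKA : pvKA (M+1) = pvKA M ++ [(M:Int)] := by
      unfold pvKA
      rw [List.range_succ, List.map_append]
      rfl
    rw [e1, e2, e3,
      ← pvTblKD_start source.toList target.toList source.toList.length target.toList.length
        (pvKA M) ((M:Int)) (M+1)
        (by intro i' j' a b c; omega)]
    rw [pvDiagB_walk source target (pvKA M) ((M:Int))
        (source.toList.length + 1) (M+1) 1 (by omega) (by omega) (by omega) (by push_cast; ring),
      hKA]

def pvKB (m N : Nat) : List Int := pvKA m ++ (List.range N).map (fun (a : Nat) => -((a:Int)+1))

lemma pvFoldB2 (source target : String) (N : Nat) (hN : N + 1 ≤ target.toList.length) :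
    (List.range N).foldl (fun d (a : Nat) =>
        pvDiagB source target (source.toList.length:Int) (target.toList.length:Int)
          1 (2+(a:Int)) 0 d)
      (pvTblK source.toList target.toList source.toList.length target.toList.length (pvKA source.toList.length))
    = pvTblK source.toList target.toList source.toList.length target.toList.length (pvKB source.toList.length N) := by
  induction N with
  | zero => simp [pvKB]
  | succ N ih =>
    rw [List.range_succ, List.foldl_append, ih (by omega)]
    simp only [List.foldl_cons, List.foldl_nil]
    have e1 : (2:Int)+(N:Int) = (((N+2:Nat)):Int) := by push_cast; ring
    have e2 : (1:Int) = (((1:Nat)):Int) := by norm_num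
    have e3 : (0:Int) = pvRun source.toList target.toList (1-1) ((N+2)-1) := by simp
    have hKB : pvKB source.toList.length (N+1) = pvKB source.toList.length N ++ [-((N:Int)+1)] := by
      unfold pvKB
      rw [List.range_succ, List.map_append, List.append_assoc]
      rfl
    rw [e2, e1, e3,
      ← pvTblKD_start source.toList target.toList source.toList.length target.toList.length
        (pvKB source.toList.length N) (-((N:Int)+1)) 1
        (by intro i' j' a b c; omega)]
    rw [pvDiagB_walk source target (pvKB source.toList.length N) (-((N:Int)+1))
        (source.toList.length + 1) 1 (N+2) (by omega) (by omega) (by omega) (by push_cast; ring),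
      hKB]

lemma pvTblK_full (s t : List Char) :
    pvTblK s t s.length t.length (pvKB s.length (t.length - 1)) = pvTbl s t s.length t.length := by
  unfold pvTblK pvTbl pvRow
  apply List.map_congr_left
  intro i hi
  simp only [List.mem_range] at hi
  apply List.map_congr_left
  intro j hj
  simp only [List.mem_range] at hj
  by_cases h0 : 1 ≤ i ∧ 1 ≤ j
  · have hmem : ((i:Int)-(j:Int)) ∈ pvKB s.length (t.length - 1) := by
      unfold pvKB pvKA
      simp only [List.mem_append, List.mem_map, List.mem_range]
      rcases Nat.lt_or_ge i j with hlt | hge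
      · right
        exact ⟨j - i - 1, by omega, by omega⟩
      · left
        exact ⟨i - j, by omega, by omega⟩
    rw [if_pos ⟨h0.1, h0.2, hmem⟩]
  · rw [if_neg (by tauto)]
    rcases Nat.lt_or_ge i 1 with h | h
    · have : i = 0 := by omega
      simp [this]
    · have : j = 0 := by omega
      simp [this]

lemma pvB_eq (source target : String) :
    calc_edit_distance_table_py_alt source target =
      (pvTbl source.toList target.toList source.toList.length target.toList.length,
       (source.toList.length : Int), (target.toList.length : Int)) := by
  unfold calc_edit_distance_table_py_alt
  simp only [PySem.Str.len_eq]
  rw [pvB_init]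
  have hr1 : PySem.List.pyRange 1 ((source.toList.length:Int)+1) 1
      = (List.range source.toList.length).map (fun (a : Nat) => 1+(a:Int)) := by
    have h : ((source.toList.length:Int)+1-1).toNat = source.toList.length := by omega
    rw [PySem.List.pyRange_one, h]
  have hr2 : PySem.List.pyRange 2 ((target.toList.length:Int)+1) 1
      = (List.range (target.toList.length - 1)).map (fun (a : Nat) => 2+(a:Int)) := by
    have h : ((target.toList.length:Int)+1-2).toNat = target.toList.length - 1 := by omega
    rw [PySem.List.pyRange_one, h]
  rw [hr1, hr2, List.foldl_append]
  simp only [List.foldl_map]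
  rcases Nat.eq_zero_or_pos target.toList.length with hn0 | hn1
  · -- no second batch of starts; pvKB m 0 = pvKA m
    have h1 : target.toList.length - 1 = 0 := by omega
    rw [h1]
    simp only [List.range_zero, List.foldl_nil]
    rw [pvFoldB1 source target source.toList.length (le_refl _)]
    have h2 : pvKA source.toList.length = pvKB source.toList.length (target.toList.length - 1) := by
      rw [h1]
      simp [pvKB]
    rw [h2, pvTblK_full source.toList target.toList]
  · rw [pvFoldB1 source target source.toList.length (le_refl _),
      pvFoldB2 source target (target.toList.length - 1) (by omega),
      pvTblK_full source.toList target.toList]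

-- ===== VERDICT (by name: the statement is the Claim_ definition above) =====
theorem calc_edit_distance_table_py_spec : Claim_equal_calc_edit_distance_table_py := by
  intro source target _
  unfold Spec_calc_edit_distance_table_py
  rw [pvA_eq, pvB_eq]
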